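-- pv_equiv track=rewrite | github.com/zmdlmd/NewsFactcheck-Agent | app/tools/search.py | _matches_domain
-- ===== SOURCE A (Python) =====
-- def _matches_domain(domain: str, candidates: list[str] | None) -> bool:
--     if not domain or not candidates:
--         return False
--     for candidate in candidates:
--         candidate = candidate.lower().strip()
--         if not candidate:
--             continue
--         if domain == candidate or domain.endswith(f".{candidate}"):
--             return True
--     return False
-- ===== SOURCE B (Python) =====
-- def _matches_domain(domain: str, candidates: list[str] | None) -> bool:
--     if not domain or not candidates:
--         return False
--     normalized = {c.lower().strip() for c in candidates}
--     normalized.discard("")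
--     suffixes = {domain[i + 1:] for i, ch in enumerate(domain) if ch == '.'}
--     suffixes.add(domain)
--     return not normalized.isdisjoint(suffixes)
-- ===== Notes on version B (the rewrite author's own statement) =====
-- stated objective: alternative
-- what changed: Instead of scanning candidates and testing each with endswith, B builds the set of normalized candidates once, enumerates the dot-suffixes of the domain directly, and answers by a set-disjointness test.
import Mathlib
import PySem

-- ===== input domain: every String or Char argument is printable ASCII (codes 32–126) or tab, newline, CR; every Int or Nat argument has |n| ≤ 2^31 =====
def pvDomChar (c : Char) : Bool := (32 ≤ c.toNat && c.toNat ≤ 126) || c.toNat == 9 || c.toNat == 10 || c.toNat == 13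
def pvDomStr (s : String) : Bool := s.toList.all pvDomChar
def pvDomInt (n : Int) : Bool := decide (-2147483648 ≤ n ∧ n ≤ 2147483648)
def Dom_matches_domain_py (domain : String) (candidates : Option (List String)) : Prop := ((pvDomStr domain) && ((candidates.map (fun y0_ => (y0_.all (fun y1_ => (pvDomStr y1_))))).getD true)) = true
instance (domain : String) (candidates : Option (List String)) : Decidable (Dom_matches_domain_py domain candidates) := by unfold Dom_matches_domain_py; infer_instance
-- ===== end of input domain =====

-- B replaces A's per-candidate endswith scan by building the normalized-candidate set and the
-- domain's dot-suffix set once and testing them for disjointness (objective: alternative).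

-- candidate.lower().strip(), used by both sources
def pvNorm (c : String) : String := PySem.Str.strip (PySem.Str.lower c)

-- ===== PORT A =====
-- the `for candidate in candidates` loop with early return True
def pvALoop (domain : String) : List String → Bool
  | [] => false
  | c :: rest =>
    if pvNorm c = "" then pvALoop domain rest
    else if domain = pvNorm c
        -- f".{candidate}" ported exactly as the char-list cons '.' :: candidate
        || PySem.Str.endswith domain (String.ofList ('.' :: (pvNorm c).toList)) then true
    else pvALoop domain rest

def matches_domain_py (domain : String) (candidates : Option (List String)) : Bool :=
  if domain = "" ∨ candidates.getD [] = [] then false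
  else pvALoop domain (candidates.getD [])

-- ===== PORT B =====
def matches_domain_py_alt (domain : String) (candidates : Option (List String)) : Bool :=
  if domain = "" ∨ candidates.getD [] = [] then false
  else
    let cs := candidates.getD []
    let normalized := PySem.Set.discard (PySem.Set.ofList (cs.map pvNorm)) ""
    let dcs := domain.toList
    -- {domain[i+1:] for i, ch in enumerate(domain) if ch == '.'} then .add(domain)
    let suffixes := PySem.Set.add
      (PySem.Set.ofList ((PySem.List.enumerate dcs).filterMap
        (fun p => if p.2 = '.' then some (String.ofList (PySem.List.slice dcs (some (p.1 + 1)) none)) else none)))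
      domain
    !(PySem.Set.isdisjoint normalized suffixes)

-- ===== PRECONDITION & SPEC =====
def Spec_matches_domain_py (domain : String) (candidates : Option (List String)) (out : Bool) : Prop := out = matches_domain_py_alt domain candidates
instance (domain : String) (candidates : Option (List String)) (out : Bool) : Decidable (Spec_matches_domain_py domain candidates out) := by unfold Spec_matches_domain_py; infer_instance

-- ===== CLAIM (what is proved, stated in full; the proofs are below) =====
def Claim_equal_matches_domain_py : Prop := ∀ (domain : String) (candidates : Option (List String)), Dom_matches_domain_py domain candidates → Spec_matches_domain_py domain candidates (matches_domain_py domain candidates)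

-- ===== LEMMAS AND PROOFS =====

-- a suffix that begins with '.' is exactly a tail cut right after some dot of cs
theorem dot_suffix_iff (cs ds : List Char) :
    ('.' :: ds) <:+ cs ↔ ∃ i, ∃ _ : i < cs.length, cs[i] = '.' ∧ ds = cs.drop (i + 1) := by
  constructor
  · rintro ⟨t, ht⟩
    refine ⟨t.length, ?_, ?_, ?_⟩
    · subst ht; simp
    · subst ht; simp
    · subst ht; simp [List.drop_append]
  · rintro ⟨i, hi, hdot, hds⟩
    refine ⟨cs.take i, ?_⟩
    have h := List.getElem_cons_drop (as := cs) (i := i) hi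
    rw [hds, ← hdot, h]
    exact List.take_append_drop i cs

-- the common characterisation both ports are reduced to
def pvHit (domain : String) (cs : List String) : Prop :=
  ∃ c ∈ cs, pvNorm c ≠ "" ∧
    (domain = pvNorm c ∨ ('.' :: (pvNorm c).toList) <:+ domain.toList)

theorem pvALoop_iff (domain : String) (cs : List String) :
    pvALoop domain cs = true ↔ pvHit domain cs := by
  induction cs with
  | nil => simp [pvALoop, pvHit]
  | cons c rest ih =>
    unfold pvHit at *
    rw [pvALoop]
    split_ifs with h1 h2
    · rw [ih]
      constructor
      · rintro ⟨c', hm, hr⟩; exact ⟨c', List.mem_cons_of_mem _ hm, hr⟩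
      · rintro ⟨c', hm, hne, hr⟩
        rcases List.mem_cons.mp hm with rfl | hm
        · exact absurd h1 hne
        · exact ⟨c', hm, hne, hr⟩
    · simp only [true_iff]
      rcases Bool.or_eq_true _ _ |>.mp h2 with h | h
      · exact ⟨c, List.mem_cons_self, h1, Or.inl (by simpa using h)⟩
      · refine ⟨c, List.mem_cons_self, h1, Or.inr ?_⟩
        rw [PySem.Str.endswith_eq] at h
        have := (PySem.Chars.endswith_iff _ _).mp h
        simpa [String.toList_ofList] using this
    · rw [ih]
      constructor
      · rintro ⟨c', hm, hr⟩; exact ⟨c', List.mem_cons_of_mem _ hm, hr⟩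
      · rintro ⟨c', hm, hne, hr⟩
        rcases List.mem_cons.mp hm with rfl | hm
        · exfalso; apply h2
          refine Bool.or_eq_true _ _ |>.mpr ?_
          rcases hr with h | h
          · exact Or.inl (by simp [h])
          · refine Or.inr ?_
            rw [PySem.Str.endswith_eq]
            refine (PySem.Chars.endswith_iff _ _).mpr ?_
            simpa [String.toList_ofList] using h
        · exact ⟨c', hm, hne, hr⟩

theorem alt_iff (domain : String) (cs : List String) (hd : domain ≠ "") (hcs : cs ≠ []) :
    matches_domain_py_alt domain (some cs) = true ↔ pvHit domain cs := by
  simp only [matches_domain_py_alt, Option.getD_some]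
  rw [if_neg (by simp [hd, hcs])]
  rw [Bool.not_eq_true', Bool.eq_false_iff, Ne, PySem.Set.isdisjoint_iff]
  push_neg
  constructor
  · rintro ⟨x, hxN, hxS⟩
    rw [PySem.Set.mem_discard, PySem.Set.mem_ofList] at hxN
    obtain ⟨hxm, hx0⟩ := hxN
    obtain ⟨c, hc, hxc⟩ := List.mem_map.mp hxm
    subst hxc
    rw [PySem.Set.mem_add] at hxS
    rcases hxS with hxS | hxd
    · rw [PySem.Set.mem_ofList] at hxS
      obtain ⟨p, hp, hpf⟩ := List.mem_filterMap.mp hxS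
      obtain ⟨k, hk, rfl⟩ := (PySem.List.mem_enumerate_iff _ _ _).mp hp
      by_cases hdot : domain.toList[k] = '.'
      · simp [hdot] at hpf
        have hcast : ((k:ℤ) + 1) = (((k+1 : Nat)) : ℤ) := by push_cast; ring
        rw [hcast, PySem.List.slice_from_natCast] at hpf
        have htl : (pvNorm c).toList = domain.toList.drop (k+1) := by
          rw [← hpf, String.toList_ofList]
        exact ⟨c, hc, hx0, Or.inr ((dot_suffix_iff _ _).mpr ⟨k, hk, hdot, htl⟩)⟩
      · simp [hdot] at hpf
    · exact ⟨c, hc, hx0, Or.inl hxd.symm⟩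
  · rintro ⟨c, hc, hne, hcase⟩
    refine ⟨pvNorm c, ?_, ?_⟩
    · rw [PySem.Set.mem_discard, PySem.Set.mem_ofList]
      exact ⟨List.mem_map.mpr ⟨c, hc, rfl⟩, hne⟩
    · rw [PySem.Set.mem_add]
      rcases hcase with h | h
      · exact Or.inr h.symm
      · left
        rw [PySem.Set.mem_ofList]
        obtain ⟨i, hi, hdot, hds⟩ := (dot_suffix_iff _ _).mp h
        refine List.mem_filterMap.mpr
          ⟨((0:ℤ) + (i:ℤ), domain.toList[i]), (PySem.List.mem_enumerate_iff _ _ _).mpr ⟨i, hi, rfl⟩, ?_⟩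
        simp only [hdot]
        rw [if_pos trivial]
        have hcast : ((0:ℤ) + (i:ℤ) + 1) = (((i+1 : Nat)) : ℤ) := by push_cast; ring
        rw [hcast, PySem.List.slice_from_natCast, ← hds, String.ofList_toList]

-- ===== VERDICT (by name: the statement is the Claim_ definition above) =====
theorem matches_domain_py_spec : Claim_equal_matches_domain_py := by
  intro domain candidates _
  unfold Spec_matches_domain_py
  by_cases hguard : domain = "" ∨ candidates.getD [] = []
  · simp [matches_domain_py, matches_domain_py_alt, hguard]
  · push_neg at hguard
    obtain ⟨hd, hcs⟩ := hguard
    match candidates with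
    | none => simp at hcs
    | some cs =>
      simp only [Option.getD_some] at hd hcs
      have hA := pvALoop_iff domain cs
      have hB := alt_iff domain cs hd hcs
      have hmain : matches_domain_py domain (some cs) = pvALoop domain cs := by
        rw [matches_domain_py, if_neg (by simp [hd, hcs])]
        rfl
      rw [hmain]
      cases hAl : pvALoop domain cs
      · cases hBl : matches_domain_py_alt domain (some cs)
        · rfl
        · exact absurd (hA.mpr (hB.mp hBl)) (by simp [hAl])
      · exact (hB.mpr (hA.mp hAl)).symm
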